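-- pv_equiv track=rewrite | github.com/Betekhtin/DocumentAnomalyDetection | ContractStructure.py | _get_num_from_str
-- ===== SOURCE A (Python) =====
-- def _get_num_from_str(s):
--     num = ''
--     for elem in s:
--         if elem == '.' or elem.isdigit():
--             num += elem
--         else:
--             break
--     num = list(map(lambda x: int(x), filter(lambda x: x != '', num.split('.'))))
--     return num
-- ===== SOURCE B (Python) =====
-- def _get_num_from_str(s):
--     result = []
--     current = ''
--     for ch in s:
--         if ch.isdigit():
--             current += ch
--         elif ch == '.':
--             if current:
--                 result.append(int(current))
--             current = ''
--         else:
--             break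
--     if current:
--         result.append(int(current))
--     return result
-- ===== Notes on version B (the rewrite author's own statement) =====
-- stated objective: simpler
-- what changed: B is a single-pass tokenizer that builds the integer list directly while scanning (flushing the digit buffer at each dot), instead of A's collect-a-prefix-string then split/filter/map pipeline.
import Mathlib
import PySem

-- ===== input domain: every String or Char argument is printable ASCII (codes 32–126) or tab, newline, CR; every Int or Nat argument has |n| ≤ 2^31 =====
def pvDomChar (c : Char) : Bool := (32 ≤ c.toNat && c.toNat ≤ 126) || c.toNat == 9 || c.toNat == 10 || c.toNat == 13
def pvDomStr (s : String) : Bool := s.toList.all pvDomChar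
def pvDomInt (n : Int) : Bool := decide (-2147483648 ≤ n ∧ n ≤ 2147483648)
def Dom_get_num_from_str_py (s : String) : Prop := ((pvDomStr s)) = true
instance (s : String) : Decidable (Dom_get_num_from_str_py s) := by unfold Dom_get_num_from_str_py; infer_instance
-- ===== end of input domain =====

-- B replaces A's collect-then-split/filter/map pipeline with one streaming pass that flushes
-- the digit buffer at each '.'; same return value, no speed claim.

-- int(x); every string it is applied to in either port is a nonempty run of ASCII digits,
-- so PySem.Int.ofStr? is some there and the default 0 is unreachable.
def pvIntOf (cs : List Char) : Int := (PySem.Int.ofStr? (String.ofList cs)).getD 0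

-- ===== PORT A =====
def get_num_from_str_py (s : String) : List Int :=
  -- the for-loop with break: collect the leading run of '.'/digit characters
  let num := s.toList.takeWhile (fun c => c == '.' || PySem.Chars.isdigit c)
  -- num.split('.'), filter non-empty, map int
  ((PySem.Chars.splitOn num ['.']).filter (fun x => x ≠ [])).map pvIntOf

-- ===== PORT B =====
def gnfsFlush (acc : List Int) (cur : List Char) : List Int :=
  if cur = [] then acc else acc ++ [pvIntOf cur]

def gnfsGo : List Char → List Int → List Char → List Int
  | [], acc, cur => gnfsFlush acc cur
  | c :: rest, acc, cur =>
    if PySem.Chars.isdigit c then gnfsGo rest acc (cur ++ [c])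
    else if c = '.' then gnfsGo rest (gnfsFlush acc cur) []
    else gnfsFlush acc cur

def get_num_from_str_py_alt (s : String) : List Int :=
  gnfsGo s.toList [] []

-- ===== PRECONDITION & SPEC =====
def Spec_get_num_from_str_py (s : String) (out : List Int) : Prop := out = get_num_from_str_py_alt s
instance (s : String) (out : List Int) : Decidable (Spec_get_num_from_str_py s out) := by unfold Spec_get_num_from_str_py; infer_instance

-- ===== CLAIM (what is proved, stated in full; the proofs are below) =====
def Claim_equal_get_num_from_str_py : Prop := ∀ (s : String), Dom_get_num_from_str_py s → Spec_get_num_from_str_py s (get_num_from_str_py s)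

-- ===== LEMMAS AND PROOFS =====

-- reference recursive form of str.split('.')
def splitDots : List Char → List (List Char)
  | [] => [[]]
  | c :: r =>
    if c = '.' then [] :: splitDots r
    else
      match splitDots r with
      | [] => [[c]]
      | h :: t => (c :: h) :: t

lemma splitDots_no_dot {l : List Char} (h : '.' ∉ l) : splitDots l = [l] := by
  induction l with
  | nil => rfl
  | cons c r ih =>
    simp only [List.mem_cons, not_or] at h
    have hc : ¬ c = '.' := fun he => h.1 he.symm
    simp [splitDots, hc, ih h.2]

lemma splitDots_append_dot {a : List Char} (w : List Char) (h : '.' ∉ a) :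
    splitDots (a ++ '.' :: w) = a :: splitDots w := by
  induction a with
  | nil => simp [splitDots]
  | cons c r ih =>
    simp only [List.mem_cons, not_or] at h
    have hc : ¬ c = '.' := fun he => h.1 he.symm
    simp [splitDots, hc, ih h.2]

lemma splitOn_go_eq (fuel : Nat) :
    ∀ (l cur : List Char) (acc : List (List Char)), l.length < fuel → '.' ∉ cur →
    PySem.Chars.splitOn.go ['.'] fuel l cur acc = acc.reverse ++ splitDots (cur.reverse ++ l) := by
  induction fuel with
  | zero => intro l cur acc h; omega
  | succ f ih =>
    intro l cur acc h hcur
    cases l with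
    | nil =>
      simp [PySem.Chars.splitOn.go,
        splitDots_no_dot (by simpa using hcur : '.' ∉ cur.reverse)]
    | cons c rest =>
      simp only [PySem.Chars.splitOn.go]
      by_cases hc : c = '.'
      · subst hc
        rw [if_pos (by simp [List.isPrefixOf])]
        simp only [List.length_cons, List.length_nil, List.drop_succ_cons, List.drop_zero, Nat.zero_add]
        rw [ih rest [] ((cur.reverse) :: acc) (by simpa using Nat.lt_of_succ_lt_succ h) (by simp)]
        rw [splitDots_append_dot rest (by simpa using hcur)]
        simp
      · have hc' : ¬ '.' = c := fun he => hc he.symm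
        rw [if_neg (by simp [List.isPrefixOf, hc'])]
        rw [ih rest (c :: cur) acc (by simpa using Nat.lt_of_succ_lt_succ h)
          (by simp only [List.mem_cons, not_or]; exact ⟨hc', hcur⟩)]
        simp

lemma splitOn_eq_splitDots (l : List Char) :
    PySem.Chars.splitOn l ['.'] = splitDots l := by
  unfold PySem.Chars.splitOn
  rw [splitOn_go_eq (l.length + 1) l [] [] (by omega) (by simp)]
  simp

def parseA (xs : List Char) : List Int :=
  ((splitDots xs).filter (fun x => x ≠ [])).map pvIntOf

lemma isdigit_ne_dot {c : Char} (h : PySem.Chars.isdigit c = true) : c ≠ '.' := by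
  intro he; subst he; simp [PySem.Chars.isdigit] at h

lemma parseA_no_dot {cur : List Char} (h : '.' ∉ cur) :
    parseA cur = if cur = [] then [] else [pvIntOf cur] := by
  simp only [parseA, splitDots_no_dot h]
  by_cases hc : cur = [] <;> simp [hc]

lemma gnfsGo_eq (l : List Char) :
    ∀ (acc : List Int) (cur : List Char), '.' ∉ cur →
    gnfsGo l acc cur
      = acc ++ parseA (cur ++ l.takeWhile (fun c => c == '.' || PySem.Chars.isdigit c)) := by
  induction l with
  | nil =>
    intro acc cur h
    simp only [gnfsGo, gnfsFlush, parseA_no_dot h, List.takeWhile_nil, List.append_nil]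
    split <;> simp
  | cons c rest ih =>
    intro acc cur h
    by_cases hd : PySem.Chars.isdigit c = true
    · have hne : c ≠ '.' := isdigit_ne_dot hd
      have h' : '.' ∉ cur ++ [c] := by
        simp [h]; exact fun he => hne he.symm
      rw [show gnfsGo (c :: rest) acc cur = gnfsGo rest acc (cur ++ [c]) by
        simp [gnfsGo, hd]]
      rw [ih acc (cur ++ [c]) h']
      have : (c :: rest).takeWhile (fun c => c == '.' || PySem.Chars.isdigit c)
          = c :: rest.takeWhile (fun c => c == '.' || PySem.Chars.isdigit c) := by
        simp [hd]
      rw [this]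
      simp
    · by_cases hc : c = '.'
      · subst hc
        rw [show gnfsGo ('.' :: rest) acc cur = gnfsGo rest (gnfsFlush acc cur) [] by
          simp [gnfsGo, hd]]
        rw [ih (gnfsFlush acc cur) [] (by simp)]
        have ht : ('.' :: rest).takeWhile (fun c => c == '.' || PySem.Chars.isdigit c)
            = '.' :: rest.takeWhile (fun c => c == '.' || PySem.Chars.isdigit c) := by
          simp
        rw [ht]
        have hsp : parseA (cur ++ '.' :: rest.takeWhile (fun c => c == '.' || PySem.Chars.isdigit c))
            = (if cur = [] then [] else [pvIntOf cur])
              ++ parseA (rest.takeWhile (fun c => c == '.' || PySem.Chars.isdigit c)) := by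
          simp only [parseA, splitDots_append_dot _ h]
          by_cases hcn : cur = [] <;> simp [hcn]
        rw [hsp]
        simp [gnfsFlush]
        split <;> simp
      · rw [show gnfsGo (c :: rest) acc cur = gnfsFlush acc cur by
          simp [gnfsGo, hd, hc]]
        have ht : (c :: rest).takeWhile (fun c => c == '.' || PySem.Chars.isdigit c) = [] := by
          simp [hd, hc]
        rw [ht, List.append_nil, parseA_no_dot h]
        simp [gnfsFlush]
        split <;> simp

-- ===== VERDICT (by name: the statement is the Claim_ definition above) =====
theorem get_num_from_str_py_spec : Claim_equal_get_num_from_str_py := by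
  intro s _
  unfold Spec_get_num_from_str_py get_num_from_str_py get_num_from_str_py_alt
  rw [gnfsGo_eq s.toList [] [] (by simp)]
  simp [splitOn_eq_splitDots, parseA]
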